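-- pv_equiv track=rewrite | github.com/alenbob/studio-quantikz | quantikz_symbolic_latex.py | parse_uniform_gate_label
-- ===== SOURCE A (Python) =====
-- def parse_uniform_gate_label(label: str) -> tuple[bool, str | None]:
--     normalized = label.strip().replace(" ", "")
--     for prefix in (r"\textsc{UNIFORM}", "UNIFORM"):
--         if normalized == prefix:
--             return True, None
--         if not normalized.startswith(prefix + "_"):
--             continue
--         remainder = normalized[len(prefix) + 1 :]
--         if remainder.startswith("{") and remainder.endswith("}") and len(remainder) >= 2:
--             remainder = remainder[1:-1].strip()
--         return True, remainder or None
--     return False, None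
-- ===== SOURCE B (Python) =====
-- def _eat(rest, lit):
--     # consume the literal char by char; return the remaining text, or None on mismatch
--     for ch in lit:
--         if rest and rest[0] == ch:
--             rest = rest[1:]
--         else:
--             return None
--     return rest
--
--
-- def parse_uniform_gate_label(label: str) -> tuple[bool, str | None]:
--     text = label.strip().replace(" ", "")
--     # recursive descent over the grammar  KEYWORD := "\textsc{" "UNIFORM" "}" | "UNIFORM"
--     # (the branch is chosen deterministically: the two alternatives start with different chars)
--     rest = _eat(text, "\\textsc{")
--     if rest is not None:
--         rest = _eat(rest, "UNIFORM")
--         if rest is not None: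
--             rest = _eat(rest, "}")
--     else:
--         rest = _eat(text, "UNIFORM")
--     if rest is None:
--         return False, None
--     if rest == "":
--         return True, None
--     if rest[0] != "_":
--         return False, None
--     sub = rest[1:]
--     if sub.startswith("{") and sub.endswith("}"):
--         sub = sub[1:-1].strip()
--     return True, sub or None
-- ===== Notes on version B (the rewrite author's own statement) =====
-- stated objective: alternative
-- what changed: A loops over the two full candidate prefixes testing string equality and startswith with slice arithmetic; B is a recursive-descent parser: a char-by-char literal consumer eats the keyword in three grammar pieces (optional \textsc{ wrapper chosen deterministically by the leading char, the shared UNIFORM core, the closing brace) and then dispatches on the single character following the keyword.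
import Mathlib
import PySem

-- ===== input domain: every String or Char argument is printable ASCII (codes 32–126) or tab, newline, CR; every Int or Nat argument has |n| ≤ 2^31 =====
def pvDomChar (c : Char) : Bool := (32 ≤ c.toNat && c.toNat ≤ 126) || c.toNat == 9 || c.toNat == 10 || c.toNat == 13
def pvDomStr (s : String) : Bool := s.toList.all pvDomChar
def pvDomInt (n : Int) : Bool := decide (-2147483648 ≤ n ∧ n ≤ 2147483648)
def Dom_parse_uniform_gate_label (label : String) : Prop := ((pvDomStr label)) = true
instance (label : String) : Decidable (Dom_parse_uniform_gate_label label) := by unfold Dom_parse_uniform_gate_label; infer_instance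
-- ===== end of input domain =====

-- B replaces A's loop over the two candidate prefixes by a recursive-descent parser: a char-by-char
-- literal consumer eats the keyword in three pieces and then dispatches on the char after it (alternative; same cost).

-- ===== PORT A =====
-- brace-strip of the remainder and the trailing 'remainder or None' of A
def pvAfinish (remainder : String) : Bool × Option String :=
  let remainder :=
    if PySem.Str.startswith remainder "{" && PySem.Str.endswith remainder "}"
        && decide (2 ≤ PySem.Str.len remainder) then
      PySem.Str.strip (PySem.Str.slice remainder (some 1) (some (-1)))
    else remainder
  (true, if remainder = "" then none else some remainder)

-- the 'for prefix in (...)' loop of A, one iteration per constructor ('continue' = recurse on rest)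
def pvAloop (normalized : String) : List String → Bool × Option String
  | [] => (false, none)
  | pfx :: rest =>
    if normalized = pfx then (true, none)
    else if PySem.Str.startswith normalized (pfx ++ "_") = false then pvAloop normalized rest
    else pvAfinish (PySem.Str.slice normalized (some (PySem.Str.len pfx + 1)) none)

def parse_uniform_gate_label (label : String) : Bool × Option String :=
  pvAloop (PySem.Str.replace (PySem.Str.strip label) " " "") ["\\textsc{UNIFORM}", "UNIFORM"]

-- ===== PORT B =====
-- B's _eat: consume the literal char by char ('for ch in lit' = recursion on lit),
-- returning the remaining text, or none on mismatch; exact for every input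
def pvEat : List Char → List Char → Option (List Char)
  | rest, [] => some rest
  | [], _ :: _ => none
  | c :: rest, ch :: lit => if c = ch then pvEat rest lit else none

-- B's brace-strip of the text after '_' and the trailing 'sub or None'
-- (sub.startswith("{") / sub.endswith("}") for one-char literals are head?/getLast?;
--  sub[1:-1] is (drop 1).dropLast, exact also for len < 2 where both give the empty string)
def pvBfin (sub : List Char) : Bool × Option String :=
  let sub :=
    if sub.head? = some '{' ∧ sub.getLast? = some '}' then
      PySem.Chars.strip ((sub.drop 1).dropLast)
    else sub
  (true, if sub = [] then none else some (String.ofList sub))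

def parse_uniform_gate_label_alt (label : String) : Bool × Option String :=
  let text := (PySem.Str.replace (PySem.Str.strip label) " " "").toList
  let rest :=
    match pvEat text "\\textsc{".toList with
    | some r =>
      match pvEat r "UNIFORM".toList with
      | some r2 => pvEat r2 "}".toList
      | none => none
    | none => pvEat text "UNIFORM".toList
  match rest with
  | none => (false, none)
  | some [] => (true, none)
  | some (c :: sub) => if c = '_' then pvBfin sub else (false, none)

-- ===== PRECONDITION & SPEC =====
def Spec_parse_uniform_gate_label (label : String) (out : Bool × Option String) : Prop := out = parse_uniform_gate_label_alt label
instance (label : String) (out : Bool × Option String) : Decidable (Spec_parse_uniform_gate_label label out) := by unfold Spec_parse_uniform_gate_label; infer_instance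

-- ===== CLAIM (what is proved, stated in full; the proofs are below) =====
def Claim_equal_parse_uniform_gate_label : Prop := ∀ (label : String), Dom_parse_uniform_gate_label label → Spec_parse_uniform_gate_label label (parse_uniform_gate_label label)

-- ===== LEMMAS AND PROOFS =====

lemma pvEat_some (lit : List Char) : ∀ (s r : List Char), pvEat s lit = some r ↔ s = lit ++ r := by
  induction lit with
  | nil => intro s r; simp [pvEat]
  | cons ch lit ih =>
    intro s r
    cases s with
    | nil => simp [pvEat]
    | cons c s' =>
      by_cases h : c = ch
      · subst h; simp [pvEat, ih]
      · simp [pvEat, h]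

lemma pvEat_none (lit s : List Char) (h : pvEat s lit = none) : ¬ (lit <+: s) := by
  rintro ⟨r, hr⟩
  rw [(pvEat_some lit s r).2 hr.symm] at h
  simp at h

lemma pv_head_prefix (l : List Char) (c : Char) : ([c] <+: l) ↔ l.head? = some c := by
  cases l <;> simp [List.cons_prefix_iff]

lemma pv_last_suffix (l : List Char) (c : Char) : ([c] <:+ l) ↔ l.getLast? = some c := by
  rw [← List.reverse_prefix]
  cases h : l.reverse with
  | nil => simp_all [List.reverse_eq_nil_iff]
  | cons a t => simp [List.cons_prefix_iff, ← List.head?_reverse, h]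

lemma pv_slice11 (l : List Char) : PySem.List.slice l (some 1) (some (-1)) = (l.drop 1).dropLast := by
  rcases l with _ | ⟨a, l⟩
  · simp [PySem.List.slice, PySem.List.clampIdx]
  · simp only [PySem.List.slice, PySem.List.clampIdx]
    rw [List.dropLast_eq_take]
    norm_num
    split_ifs <;> omega

lemma pv_out_eq (x : String) :
    ((true, if x = "" then none else some x) : Bool × Option String)
      = (true, if x.toList = [] then none else some (String.ofList x.toList)) := by
  by_cases h : x.toList = [] <;> simp [String.ext_iff, h]

lemma pv_len2 (l : List Char) (h1 : l.head? = some '{') (h2 : l.getLast? = some '}') :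
    2 ≤ l.length := by
  match l with
  | [] => simp at h1
  | [a] =>
    simp at h1 h2
    rw [h1] at h2; exact absurd h2 (by decide)
  | a :: b :: t => simp

lemma pv_finish_eq (r : String) : pvAfinish r = pvBfin r.toList := by
  unfold pvAfinish pvBfin
  have hsl : (PySem.Str.strip (PySem.Str.slice r (some 1) (some (-1)))).toList
      = PySem.Chars.strip ((r.toList.drop 1).dropLast) := by
    rw [PySem.Str.toList_strip, PySem.Str.toList_slice, PySem.Chars.slice_eq_listSlice, pv_slice11]
  have e1 : ("{" : String).toList = ['{'] := rfl
  have e2 : ("}" : String).toList = ['}'] := rfl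
  by_cases hc : r.toList.head? = some '{' ∧ r.toList.getLast? = some '}'
  · have hb : (PySem.Str.startswith r "{" && PySem.Str.endswith r "}"
        && decide (2 ≤ PySem.Str.len r)) = true := by
      simp only [Bool.and_eq_true, decide_eq_true_eq, PySem.Str.startswith_eq,
        PySem.Str.endswith_eq, PySem.Chars.startswith_iff, PySem.Chars.endswith_iff,
        PySem.Str.len_eq, e1, e2, pv_head_prefix, pv_last_suffix]
      exact ⟨⟨hc.1, hc.2⟩, by exact_mod_cast pv_len2 _ hc.1 hc.2⟩
    rw [if_pos hb, if_pos hc, pv_out_eq, hsl]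
  · have hb : ¬((PySem.Str.startswith r "{" && PySem.Str.endswith r "}"
        && decide (2 ≤ PySem.Str.len r)) = true) := by
      simp only [Bool.and_eq_true, decide_eq_true_eq, PySem.Str.startswith_eq,
        PySem.Str.endswith_eq, PySem.Chars.startswith_iff, PySem.Chars.endswith_iff,
        PySem.Str.len_eq, e1, e2, pv_head_prefix, pv_last_suffix]
      intro h
      exact hc ⟨h.1.1, h.1.2⟩
    rw [if_neg hb, if_neg hc, pv_out_eq]

-- A's body for one candidate prefix p, when the normalized label is exactly p followed by t,
-- equals B's dispatch on t ('rest' abstracts A's continuation for the no-match branches)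
lemma pv_Amatch (n p : String) (t : List Char) (rest : Bool × Option String)
    (hn : n.toList = p.toList ++ t) :
    (if n = p then ((true, none) : Bool × Option String)
     else if PySem.Str.startswith n (p ++ "_") = false then rest
     else pvAfinish (PySem.Str.slice n (some (PySem.Str.len p + 1)) none))
    = match t with
      | [] => (true, none)
      | c :: sub => if c = '_' then pvBfin sub else rest := by
  have heq : n = p ↔ t = [] := by
    rw [String.ext_iff, hn]
    constructor
    · intro h
      have := List.append_cancel_left (by simpa using h : p.toList ++ t = p.toList ++ [])
      exact this
    · rintro rfl; simp
  have hsw : PySem.Str.startswith n (p ++ "_") = true ↔ t.head? = some '_' := by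
    rw [PySem.Str.startswith_eq, PySem.Chars.startswith_iff, hn,
      show (p ++ "_" : String).toList = p.toList ++ ['_'] by simp,
      List.prefix_append_right_inj, pv_head_prefix]
  cases t with
  | nil => rw [if_pos (heq.2 rfl)]
  | cons c sub =>
    have hne : ¬ n = p := fun h => by simpa using heq.1 h
    rw [if_neg hne]
    by_cases hc : c = '_'
    · subst hc
      have hsw' : PySem.Str.startswith n (p ++ "_") = true := hsw.2 (by simp)
      have hF : ¬ (PySem.Str.startswith n (p ++ "_") = false) := by rw [hsw']; decide
      rw [if_neg hF, pv_finish_eq]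
      have hdrop : (PySem.Str.slice n (some (PySem.Str.len p + 1)) none).toList = sub := by
        rw [PySem.Str.toList_slice, PySem.Chars.slice_eq_listSlice, PySem.Str.len_eq,
          show ((p.toList.length : Int) + 1) = ((p.toList.length + 1 : Nat) : Int) by push_cast; ring,
          PySem.List.slice_from _ (by exact_mod_cast Nat.zero_le _), Int.toNat_natCast, hn,
          ← List.drop_drop, List.drop_left]
        rfl
      rw [hdrop]
      simp
    · have hsw' : PySem.Str.startswith n (p ++ "_") = false := by
        rw [Bool.eq_false_iff, Ne, hsw]
        simp [hc]
      rw [if_pos hsw']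
      simp [hc]

-- A's body for one candidate prefix p falls through to its continuation when p is not a prefix of n
lemma pv_Anomatch (n p : String) (rest : Bool × Option String)
    (h : ¬ (p.toList <+: n.toList)) :
    (if n = p then ((true, none) : Bool × Option String)
     else if PySem.Str.startswith n (p ++ "_") = false then rest
     else pvAfinish (PySem.Str.slice n (some (PySem.Str.len p + 1)) none))
    = rest := by
  have hne : ¬ n = p := by
    rintro rfl
    exact h (List.prefix_refl _)
  have hsw : PySem.Str.startswith n (p ++ "_") = false := by
    rw [Bool.eq_false_iff, Ne, PySem.Str.startswith_eq, PySem.Chars.startswith_iff,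
      show (p ++ "_" : String).toList = p.toList ++ ['_'] by simp]
    intro hp
    exact h (List.IsPrefix.trans ⟨['_'], rfl⟩ hp)
  rw [if_neg hne, if_pos hsw]

-- if n starts with '\\', the "UNIFORM" candidate cannot be a prefix of n
lemma pv_noU (n : String) (r : List Char) (h : n.toList = "\\textsc{".toList ++ r) :
    ¬ (("UNIFORM" : String).toList <+: n.toList) := by
  rintro ⟨u, hu⟩
  have e1 : ("UNIFORM" : String).toList = 'U' :: "NIFORM".toList := by decide
  have e2 : ("\\textsc{" : String).toList = '\\' :: "textsc{".toList := by decide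
  have hh := hu.trans h
  rw [e1, e2] at hh
  simp at hh

-- ===== VERDICT (by name: the statement is the Claim_ definition above) =====
theorem parse_uniform_gate_label_spec : Claim_equal_parse_uniform_gate_label := by
  intro label _
  unfold Spec_parse_uniform_gate_label parse_uniform_gate_label parse_uniform_gate_label_alt
  generalize (PySem.Str.replace (PySem.Str.strip label) " " "") = n
  simp only [pvAloop]
  have hP1 : ("\\textsc{UNIFORM}" : String).toList
      = "\\textsc{".toList ++ ("UNIFORM".toList ++ ("}".toList ++ [])) := by decide
  rcases h1 : pvEat n.toList "\\textsc{".toList with _ | r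
  · -- "\textsc{" is not a prefix of n: A's first candidate fails both tests
    have hW := pvEat_none _ _ h1
    have hnoP1 : ¬ (("\\textsc{UNIFORM}" : String).toList <+: n.toList) := fun hp =>
      hW (List.IsPrefix.trans ⟨"UNIFORM".toList ++ ("}".toList ++ []), hP1.symm⟩ hp)
    rcases h2 : pvEat n.toList "UNIFORM".toList with _ | t
    · rw [pv_Anomatch _ _ _ hnoP1, pv_Anomatch _ _ _ (pvEat_none _ _ h2)]
    · rw [pv_Anomatch _ _ _ hnoP1, pv_Amatch _ _ t _ ((pvEat_some _ _ _).1 h2)]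
      cases t with
      | nil => rfl
      | cons c sub => by_cases hc : c = '_' <;> simp [hc]
  · -- n = "\textsc{" ++ r
    have hr : n.toList = "\\textsc{".toList ++ r := (pvEat_some _ _ _).1 h1
    have hnoU := pv_noU n r hr
    rcases h2 : pvEat r "UNIFORM".toList with _ | r2
    · -- the keyword body fails: the full first prefix is not a prefix either
      have hnoP1 : ¬ (("\\textsc{UNIFORM}" : String).toList <+: n.toList) := by
        rintro ⟨u, hu⟩
        have hru : r = "UNIFORM".toList ++ ("}".toList ++ u) := by
          apply List.append_cancel_left (as := "\\textsc{".toList)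
          rw [← hr, ← hu, hP1]; simp
        rw [(pvEat_some _ _ _).2 hru] at h2
        simp at h2
      simp only [h2]
      rw [pv_Anomatch _ _ _ hnoP1, pv_Anomatch _ _ _ hnoU]
    · have hr2 : r = ("UNIFORM" : String).toList ++ r2 := (pvEat_some _ _ _).1 h2
      rcases h3 : pvEat r2 "}".toList with _ | t
      · have hnoP1 : ¬ (("\\textsc{UNIFORM}" : String).toList <+: n.toList) := by
          rintro ⟨u, hu⟩
          have hru : r = "UNIFORM".toList ++ ("}".toList ++ u) := by
            apply List.append_cancel_left (as := "\\textsc{".toList)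
            rw [← hr, ← hu, hP1]; simp
          have hr2c : r2 = "}".toList ++ u := List.append_cancel_left (by rw [← hr2, hru])
          rw [(pvEat_some _ _ _).2 hr2c] at h3
          simp at h3
        simp only [h2, h3]
        rw [pv_Anomatch _ _ _ hnoP1, pv_Anomatch _ _ _ hnoU]
      · have ht : r2 = ("}" : String).toList ++ t := (pvEat_some _ _ _).1 h3
        have hn1 : n.toList = ("\\textsc{UNIFORM}" : String).toList ++ t := by
          rw [hr, hr2, ht, hP1]; simp
        simp only [h2, h3]
        rw [pv_Amatch _ _ t _ hn1]
        cases t with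
        | nil => rfl
        | cons c sub =>
          by_cases hc : c = '_'
          · simp [hc]
          · simp only [if_neg hc]
            rw [pv_Anomatch _ _ _ hnoU]
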